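-- pv_equiv track=rewrite | github.com/po4yka/RIPDPI | scripts/ci/verify_design_md.py | parse_front_matter_keys
-- ===== SOURCE A (Python) =====
-- FRONT_MATTER_GROUPS = ("colors", "typography", "rounded", "spacing", "components")
--
-- def parse_front_matter_keys(front_matter: str) -> dict[str, set[str]]:
--     keys = {group: set() for group in FRONT_MATTER_GROUPS}
--     current_group: str | None = None
--
--     for raw_line in front_matter.splitlines():
--         stripped = raw_line.strip()
--         if not stripped or stripped.startswith("#"):
--             continue
--
--         indent = len(raw_line) - len(raw_line.lstrip(" "))
--         if indent == 0:
--             current_group = stripped[:-1] if stripped.endswith(":") else None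
--             continue
--
--         if current_group is None or current_group not in keys:
--             continue
--
--         if current_group in {"colors", "rounded", "spacing"} and indent == 2 and ":" in stripped:
--             keys[current_group].add(stripped.split(":", 1)[0].strip())
--         elif current_group in {"typography", "components"} and indent == 2 and stripped.endswith(":"):
--             keys[current_group].add(stripped[:-1].strip())
--
--     return keys
-- ===== SOURCE B (Python) =====
-- FRONT_MATTER_GROUPS = ("colors", "typography", "rounded", "spacing", "components")
--
-- def parse_front_matter_keys(front_matter: str) -> dict[str, set[str]]:
--     # phase 1: index body lines by the group section they belong to
--     index = {group: [] for group in FRONT_MATTER_GROUPS}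
--     open_group = None
--     for raw in front_matter.splitlines():
--         stripped = raw.strip()
--         if not stripped or stripped.startswith("#"):
--             continue
--         indent = len(raw) - len(raw.lstrip(" "))
--         if indent == 0:
--             name = stripped[:-1] if stripped.endswith(":") else None
--             open_group = name if name in index else None
--         elif open_group is not None:
--             index[open_group].append((indent, stripped))
--     # phase 2: apply each group's extraction rule to its body lines
--     result = {}
--     for group in FRONT_MATTER_GROUPS:
--         if group in ("colors", "rounded", "spacing"):
--             result[group] = {s.split(":", 1)[0].strip()
--                              for i, s in index[group] if i == 2 and ":" in s}
--         else:
--             result[group] = {s[:-1].strip()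
--                              for i, s in index[group] if i == 2 and s.endswith(":")}
--     return result
-- ===== Notes on version B (the rewrite author's own statement) =====
-- stated objective: alternative
-- what changed: A's single pass with a mutable current_group that classifies each body line as it is seen is replaced by a two-phase decomposition: a first pass partitions body lines into a group->body-lines index (validating headers at section-open time), then a second loop over FRONT_MATTER_GROUPS applies each group's extraction rule as a set comprehension over its collected body lines.
import Mathlib
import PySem

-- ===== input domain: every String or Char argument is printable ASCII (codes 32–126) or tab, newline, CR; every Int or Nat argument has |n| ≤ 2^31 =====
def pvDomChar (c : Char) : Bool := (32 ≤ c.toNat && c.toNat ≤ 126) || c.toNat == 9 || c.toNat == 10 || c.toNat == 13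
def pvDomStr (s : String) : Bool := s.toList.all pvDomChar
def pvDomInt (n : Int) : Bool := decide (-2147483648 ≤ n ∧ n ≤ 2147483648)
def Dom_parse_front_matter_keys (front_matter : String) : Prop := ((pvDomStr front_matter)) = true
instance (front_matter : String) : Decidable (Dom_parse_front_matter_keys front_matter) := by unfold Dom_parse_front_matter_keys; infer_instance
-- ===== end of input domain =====

-- B replaces A's single pass with a mutable current group by a two-phase build-index-then-extract decomposition (objective: alternative, same cost).

-- shared module constant FRONT_MATTER_GROUPS
def pvGroups : List String := ["colors", "typography", "rounded", "spacing", "components"]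

-- len(raw) - len(raw.lstrip(" ")): the number of leading ' ' characters (exact: lstrip(" ") removes exactly the leading spaces)
def pvIndent (raw : String) : Nat := (raw.toList.takeWhile (· == ' ')).length

-- stripped.split(":", 1)[0].strip() (exact: the piece before the first ':', or the whole string if no ':')
def pvKeyBeforeColon (stripped : String) : String :=
  String.ofList (PySem.Chars.strip (stripped.toList.takeWhile (· ≠ ':')))

-- stripped[:-1].strip()
def pvKeyDropColon (stripped : String) : String :=
  String.ofList (PySem.Chars.strip stripped.toList.dropLast)

-- ===== PORT A =====
def pvStepA (st : PySem.Dict String (PySem.Set String) × Option String) (raw : String) :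
    PySem.Dict String (PySem.Set String) × Option String :=
  let keys := st.1
  let cur := st.2
  let stripped := PySem.Str.strip raw
  if stripped = "" ∨ PySem.Str.startswith stripped "#" = true then st
  else
    let indent := pvIndent raw
    if indent = 0 then
      (keys, if PySem.Str.endswith stripped ":" = true then some (String.ofList stripped.toList.dropLast) else none)
    else
      match cur with
      | none => st
      | some g =>
        if keys.contains g = false then st
        else if (g = "colors" ∨ g = "rounded" ∨ g = "spacing") ∧ indent = 2 ∧ PySem.Str.isIn ":" stripped = true then
          (keys.modify g PySem.Set.empty (fun s => PySem.Set.add s (pvKeyBeforeColon stripped)), cur)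
        else if (g = "typography" ∨ g = "components") ∧ indent = 2 ∧ PySem.Str.endswith stripped ":" = true then
          (keys.modify g PySem.Set.empty (fun s => PySem.Set.add s (pvKeyDropColon stripped)), cur)
        else st

def pvInitA : PySem.Dict String (PySem.Set String) :=
  pvGroups.foldl (fun d g => d.insert g PySem.Set.empty) PySem.Dict.empty

def parse_front_matter_keys (front_matter : String) : List (String × List String) :=
  ((PySem.Str.splitlines front_matter).foldl pvStepA (pvInitA, none)).1.items

-- ===== PORT B =====
-- phase 1 step: partition body lines into sections (index : group -> its body lines (indent, stripped))
def pvStepB (st : PySem.Dict String (List (Nat × String)) × Option String) (raw : String) :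
    PySem.Dict String (List (Nat × String)) × Option String :=
  let index := st.1
  let og := st.2
  let stripped := PySem.Str.strip raw
  if stripped = "" ∨ PySem.Str.startswith stripped "#" = true then st
  else
    let indent := pvIndent raw
    if indent = 0 then
      let name : Option String :=
        if PySem.Str.endswith stripped ":" = true then some (String.ofList stripped.toList.dropLast) else none
      (index, match name with
              | some n => if index.contains n = true then some n else none
              | none => none)
    else
      match og with
      | some g => (index.modify g [] (· ++ [(indent, stripped)]), og)
      | none => st

def pvInitB : PySem.Dict String (List (Nat × String)) :=
  pvGroups.foldl (fun d g => d.insert g []) PySem.Dict.empty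

-- phase 2: the per-group extraction rule (a set comprehension over the group's body lines)
def pvExtract (g : String) (body : List (Nat × String)) : PySem.Set String :=
  if g = "colors" ∨ g = "rounded" ∨ g = "spacing" then
    PySem.Set.ofList ((body.filter (fun p => p.1 == 2 && PySem.Str.isIn ":" p.2)).map
      (fun p => pvKeyBeforeColon p.2))
  else
    PySem.Set.ofList ((body.filter (fun p => p.1 == 2 && PySem.Str.endswith p.2 ":")).map
      (fun p => pvKeyDropColon p.2))

def parse_front_matter_keys_alt (front_matter : String) : List (String × List String) :=
  let fin := (PySem.Str.splitlines front_matter).foldl pvStepB (pvInitB, none)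
  (pvGroups.foldl (fun d g => d.insert g (pvExtract g (fin.1.getD g []))) PySem.Dict.empty).items

-- ===== PRECONDITION & SPEC =====
def Spec_parse_front_matter_keys (front_matter : String) (out : List (String × List String)) : Prop := out = parse_front_matter_keys_alt front_matter
instance (front_matter : String) (out : List (String × List String)) : Decidable (Spec_parse_front_matter_keys front_matter out) := by unfold Spec_parse_front_matter_keys; infer_instance

-- ===== CLAIM (what is proved, stated in full; the proofs are below) =====
def Claim_equal_parse_front_matter_keys : Prop := ∀ (front_matter : String), Dom_parse_front_matter_keys front_matter → Spec_parse_front_matter_keys front_matter (parse_front_matter_keys front_matter)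

-- ===== LEMMAS AND PROOFS =====

-- the invariant tying A's running state to B's index
def pvInv (sA : PySem.Dict String (PySem.Set String) × Option String)
    (sB : PySem.Dict String (List (Nat × String)) × Option String) : Prop :=
  sA.1.keys = pvGroups ∧ sB.1.keys = pvGroups ∧
  (sB.2 = match sA.2 with
          | some g => if g ∈ pvGroups then some g else none
          | none => none) ∧
  ∀ g ∈ pvGroups, sA.1.getD g [] = pvExtract g (sB.1.getD g [])

theorem pvSet_ofList_append (l : List String) (x : String) :
    PySem.Set.ofList (l ++ [x]) = PySem.Set.add (PySem.Set.ofList l) x := by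
  simp [PySem.Set.ofList_eq_foldl, List.foldl_append]

-- appending one body line to a group's section updates its extracted set pointwise
theorem pvExtract_append (g : String) (body : List (Nat × String)) (i : Nat) (s : String) :
    pvExtract g (body ++ [(i, s)]) =
      if g = "colors" ∨ g = "rounded" ∨ g = "spacing" then
        (if i = 2 ∧ PySem.Str.isIn ":" s = true then
          PySem.Set.add (pvExtract g body) (pvKeyBeforeColon s) else pvExtract g body)
      else
        (if i = 2 ∧ PySem.Str.endswith s ":" = true then
          PySem.Set.add (pvExtract g body) (pvKeyDropColon s) else pvExtract g body) := by
  unfold pvExtract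
  split_ifs with h1 h2 h3 <;>
    simp_all [List.filter_append, List.map_append, pvSet_ofList_append]

theorem pvInv_step (sA : PySem.Dict String (PySem.Set String) × Option String)
    (sB : PySem.Dict String (List (Nat × String)) × Option String)
    (h : pvInv sA sB) (raw : String) : pvInv (pvStepA sA raw) (pvStepB sB raw) := by
  obtain ⟨kA, cA⟩ := sA
  obtain ⟨iB, oB⟩ := sB
  obtain ⟨h1, h2, h3, h4⟩ := h
  simp only [pvStepA, pvStepB]
  by_cases hb : PySem.Str.strip raw = "" ∨ PySem.Str.startswith (PySem.Str.strip raw) "#" = true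
  · simp only [if_pos hb]; exact ⟨h1, h2, h3, h4⟩
  · simp only [if_neg hb]
    by_cases hi : pvIndent raw = 0
    · simp only [if_pos hi]
      refine ⟨h1, h2, ?_, h4⟩
      by_cases he : PySem.Str.endswith (PySem.Str.strip raw) ":" = true
      · simp only [if_pos he]
        by_cases hm : String.ofList (PySem.Str.strip raw).toList.dropLast ∈ pvGroups
        · simp only [hm, if_pos ((PySem.Dict.contains_iff_mem_keys iB _).2 (h2 ▸ hm)), if_pos trivial]
        · have hcon : iB.contains (String.ofList (PySem.Str.strip raw).toList.dropLast) = false := by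
            rcases Bool.eq_false_or_eq_true (iB.contains (String.ofList (PySem.Str.strip raw).toList.dropLast)) with ht | hf
            · exact absurd ((PySem.Dict.contains_iff_mem_keys iB _).1 ht) (h2 ▸ hm)
            · exact hf
          simp only [hm, hcon, Bool.false_eq_true, if_false]
      · simp only [if_neg he]
    · simp only [if_neg hi]
      cases cA with
      | none =>
        simp only at h3
        subst h3
        exact ⟨h1, h2, rfl, h4⟩
      | some g =>
        by_cases hg : g ∈ pvGroups
        · have hc : kA.contains g = true := (PySem.Dict.contains_iff_mem_keys kA g).2 (h1 ▸ hg)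
          have ho : oB = some g := by simpa [hg] using h3
          subst ho
          simp only [hc, Bool.true_eq_false, if_false]
          have hkeysB : (iB.modify g [] (· ++ [(pvIndent raw, PySem.Str.strip raw)])).keys = pvGroups := by
            rw [PySem.Dict.keys_modify, PySem.Dict.keys_insert_of_contains _ _ ((PySem.Dict.contains_iff_mem_keys iB g).2 (h2 ▸ hg))]
            exact h2
          have hAgetD : ∀ (f : PySem.Set String → PySem.Set String) (g' : String), g' ∈ pvGroups →
              (kA.modify g PySem.Set.empty f).getD g' [] =
                if g' = g then f (kA.getD g []) else kA.getD g' [] := by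
            intro f g' _
            by_cases hgg : g' = g
            · subst hgg; rw [if_pos rfl]; exact PySem.Dict.getD_modify_self kA g' _ f
            · rw [if_neg hgg]; exact PySem.Dict.getD_modify_of_ne kA _ f hgg
          have hkeysA : ∀ (f : PySem.Set String → PySem.Set String),
              (kA.modify g PySem.Set.empty f).keys = pvGroups := by
            intro f
            rw [PySem.Dict.keys_modify, PySem.Dict.keys_insert_of_contains _ _ hc]
            exact h1
          have hBgetD : ∀ g', g' ∈ pvGroups →
              (iB.modify g [] (· ++ [(pvIndent raw, PySem.Str.strip raw)])).getD g' [] =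
                if g' = g then iB.getD g [] ++ [(pvIndent raw, PySem.Str.strip raw)] else iB.getD g' [] := by
            intro g' _
            by_cases hgg : g' = g
            · subst hgg; rw [if_pos rfl]; exact PySem.Dict.getD_modify_self iB g' _ _
            · rw [if_neg hgg]; exact PySem.Dict.getD_modify_of_ne iB _ _ hgg
          by_cases hc1 : (g = "colors" ∨ g = "rounded" ∨ g = "spacing") ∧ pvIndent raw = 2 ∧ PySem.Str.isIn ":" (PySem.Str.strip raw) = true
          · simp only [if_pos hc1]
            refine ⟨hkeysA _, hkeysB, by simp [hg], ?_⟩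
            intro g' hg'
            rw [hAgetD _ g' hg', hBgetD g' hg']
            by_cases hgg : g' = g
            · subst hgg
              rw [if_pos rfl, if_pos rfl, h4 g' hg', pvExtract_append]
              rw [if_pos hc1.1, if_pos ⟨hc1.2.1, hc1.2.2⟩]
            · rw [if_neg hgg, if_neg hgg]; exact h4 g' hg'
          · simp only [if_neg hc1]
            by_cases hc2 : (g = "typography" ∨ g = "components") ∧ pvIndent raw = 2 ∧ PySem.Str.endswith (PySem.Str.strip raw) ":" = true
            · simp only [if_pos hc2]
              refine ⟨hkeysA _, hkeysB, by simp [hg], ?_⟩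
              intro g' hg'
              rw [hAgetD _ g' hg', hBgetD g' hg']
              by_cases hgg : g' = g
              · subst hgg
                rw [if_pos rfl, if_pos rfl, h4 g' hg', pvExtract_append]
                have hnkv : ¬ (g' = "colors" ∨ g' = "rounded" ∨ g' = "spacing") := by
                  rcases hc2.1 with rfl | rfl <;> decide
                rw [if_neg hnkv, if_pos ⟨hc2.2.1, hc2.2.2⟩]
              · rw [if_neg hgg, if_neg hgg]; exact h4 g' hg'
            · simp only [if_neg hc2]
              refine ⟨h1, hkeysB, by simp [hg], ?_⟩
              intro g' hg'
              rw [hBgetD g' hg']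
              by_cases hgg : g' = g
              · subst hgg
                rw [if_pos rfl, h4 g' hg', pvExtract_append]
                by_cases hkv : g' = "colors" ∨ g' = "rounded" ∨ g' = "spacing"
                · rw [if_pos hkv, if_neg (fun hh => hc1 ⟨hkv, hh.1, hh.2⟩)]
                · have hty : g' = "typography" ∨ g' = "components" := by
                    simp only [pvGroups, List.mem_cons, List.not_mem_nil, or_false] at hg'
                    rcases hg' with rfl | rfl | rfl | rfl | rfl <;> simp_all
                  rw [if_neg hkv, if_neg (fun hh => hc2 ⟨hty, hh.1, hh.2⟩)]
              · rw [if_neg hgg]; exact h4 g' hg'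
        · have hc : kA.contains g = false := by
            rcases Bool.eq_false_or_eq_true (kA.contains g) with ht | hf
            · exact absurd ((PySem.Dict.contains_iff_mem_keys kA g).1 ht) (h1 ▸ hg)
            · exact hf
          have ho : oB = none := by simpa [hg] using h3
          subst ho
          simp only [hc]
          exact ⟨h1, h2, by simp [hg], h4⟩

theorem pvInv_foldl (ls : List String)
    (sA : PySem.Dict String (PySem.Set String) × Option String)
    (sB : PySem.Dict String (List (Nat × String)) × Option String)
    (h : pvInv sA sB) : pvInv (ls.foldl pvStepA sA) (ls.foldl pvStepB sB) := by
  induction ls generalizing sA sB with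
  | nil => exact h
  | cons l ls ih => exact ih _ _ (pvInv_step _ _ h l)

theorem pvInv_init : pvInv (pvInitA, none) (pvInitB, none) := by
  refine ⟨by decide, by decide, rfl, by decide⟩

-- ===== VERDICT (by name: the statement is the Claim_ definition above) =====
theorem parse_front_matter_keys_spec : Claim_equal_parse_front_matter_keys := by
  intro fm _
  unfold Spec_parse_front_matter_keys parse_front_matter_keys parse_front_matter_keys_alt
  obtain ⟨h1, h2, -, h4⟩ := pvInv_foldl (PySem.Str.splitlines fm) _ _ pvInv_init
  rw [PySem.Dict.items_eq_map_keys _ (by rw [h1]; decide) ([] : PySem.Set String), h1]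
  rw [PySem.Dict.items_foldl_insert_fresh pvGroups (fun g => g)
        (fun g => pvExtract g ((((PySem.Str.splitlines fm).foldl pvStepB (pvInitB, none)).1).getD g []))
        PySem.Dict.empty (by intro a _; simp [PySem.Dict.contains_empty]) (by decide)]
  rw [show PySem.Dict.empty.items = ([] : List (String × List String)) from rfl, List.nil_append]
  exact List.map_congr_left fun g hg => by rw [h4 g hg]
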